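-- pv_equiv track=rewrite | github.com/Majezuar/Artificial-intelligence-2023-UABCS | INTELIGENCIA ARTIFICIAL/ManuelZuñiga_pancakeAstar.py | a_star_permutations
-- ===== SOURCE A (Python) =====
-- import heapq
--
-- def a_star_permutations(lst, goal):
--     def h(node):
--         # Heurística consistente
--         return sum(hamming(a, b) for a, b in zip(node, goal))
--
--     def hamming(a, b):
--         # Distancia de Hamming entre dos elementos
--         return int(a != b)
--
--     letras = tuple(lst)
--     goal = tuple(goal)
--     visited = {letras: 0}
--     stack = [(h(letras), letras)]
--     while stack:
--         f, node = heapq.heappop(stack)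
--         if node == goal:
--             return node
--         for i in range(len(node)):
--             for j in range(i + 1, len(node)):
--                 # Genera todos los posibles siguientes estados a partir de los intercambios de dos elementos
--                 next_node = node[:i] + (node[j],) + node[i+1:j] + (node[i],) + node[j+1:]
--                 g = visited[node] + 1
--                 if next_node not in visited or g < visited[next_node]:
--                     visited[next_node] = g
--                     heapq.heappush(stack, (g + h(next_node), next_node))
--     return None
-- ===== SOURCE B (Python) =====
-- def a_star_permutations(lst, goal):
--     # Swapping two positions can realize exactly the permutations of lst, and the
--     # search returns the goal tuple itself on success, so the whole A* search
--     # collapses to a multiset-equality test.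
--     if sorted(lst) == sorted(goal):
--         return tuple(goal)
--     return None
-- ===== Notes on version B (the rewrite author's own statement) =====
-- stated objective: faster
-- what changed: Replaced the exponential A* search over all swap-generated permutations with a direct multiset-equality test (sorted(lst)==sorted(goal)), returning tuple(goal) on success and None otherwise; intended as asymptotically faster: in a timing run A timed out at n=16 while B returned instantly, so no finite ratio could be measured.
import Mathlib
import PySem

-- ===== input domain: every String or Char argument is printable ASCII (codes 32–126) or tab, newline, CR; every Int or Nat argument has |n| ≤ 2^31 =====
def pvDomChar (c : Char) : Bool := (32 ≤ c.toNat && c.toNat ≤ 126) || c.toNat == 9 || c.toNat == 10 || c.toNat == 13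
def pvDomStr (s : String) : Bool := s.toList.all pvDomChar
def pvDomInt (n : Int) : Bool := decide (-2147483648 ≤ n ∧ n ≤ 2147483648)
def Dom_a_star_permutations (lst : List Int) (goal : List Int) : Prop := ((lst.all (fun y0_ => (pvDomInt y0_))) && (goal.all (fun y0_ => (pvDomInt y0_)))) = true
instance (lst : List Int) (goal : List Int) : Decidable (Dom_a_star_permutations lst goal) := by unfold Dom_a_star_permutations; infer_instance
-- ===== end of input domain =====

-- B replaces the exponential A* search over swap-generated permutations by a single
-- multiset-equality test (sorted comparison); intended as asymptotically faster (in the timing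
-- run A timed out at n=16 while B returned, so no finite ratio was measured).

-- ===== PORT A =====
-- h(node): sum of hamming(a, b) over zip(node, goal)
def pvH (goal node : List Int) : Int :=
  ((node.zip goal).map (fun ab => if ab.1 ≠ ab.2 then (1 : Int) else 0)).sum

-- Python tuple '<' comparison on (f, node) heap entries: lexicographic
def pvListLt : List Int → List Int → Bool
  | [], [] => false
  | [], _ :: _ => true
  | _ :: _, [] => false
  | a :: as, b :: bs => a < b || (a == b && pvListLt as bs)

def pvEntryLt (a b : Int × List Int) : Bool :=
  a.1 < b.1 || (a.1 == b.1 && pvListLt a.2 b.2)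

-- heapq.heappop returns the smallest entry: running minimum over the heap list
def pvPopMin (x : Int × List Int) (xs : List (Int × List Int)) : Int × List Int :=
  xs.foldl (fun m y => if pvEntryLt y m then y else m) x

-- next_node = node[:i] + (node[j],) + node[i+1:j] + (node[i],) + node[j+1:]
-- (pyGetD with default 0 is exact here: i, j are indices produced by range(len(node)))
def pvNext (node : List Int) (i j : Int) : List Int :=
  PySem.List.slice node none (some i) ++ [PySem.List.pyGetD node j 0]
    ++ PySem.List.slice node (some (i + 1)) (some j) ++ [PySem.List.pyGetD node i 0]
    ++ PySem.List.slice node (some (j + 1)) none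

-- the double loop 'for i in range(n): for j in range(i+1, n):' as its list of index pairs
def pvPairs (n : Int) : List (Int × Int) :=
  (PySem.List.pyRange 0 n 1).flatMap (fun i => (PySem.List.pyRange (i + 1) n 1).map (fun j => (i, j)))

-- the body of the double loop: computes next_node, g, and conditionally records and pushes
def pvRelax (goal node : List Int) (st : List (Int × List Int) × PySem.Dict (List Int) Int)
    (ij : Int × Int) : List (Int × List Int) × PySem.Dict (List Int) Int :=
  let next := pvNext node ij.1 ij.2
  let g := st.2.getD node 0 + 1      -- visited[node]: the key is always present for a popped node
  match st.2.get? next with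
  | none => (st.1 ++ [(g + pvH goal next, next)], st.2.insert next g)
  | some v => if g < v then (st.1 ++ [(g + pvH goal next, next)], st.2.insert next g) else st

-- the while loop; fuel only makes the recursion structural and is proved sufficient below
def pvLoop (goal : List Int) : Nat → List (Int × List Int) → PySem.Dict (List Int) Int → Option (List Int)
  | 0, _, _ => none
  | _ + 1, [], _ => none
  | fuel + 1, e :: rest, visited =>
    let m := pvPopMin e rest
    let stack' := (e :: rest).erase m
    if m.2 = goal then some m.2
    else
      let s := (pvPairs (PySem.List.len m.2)).foldl (pvRelax goal m.2) (stack', visited)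
      pvLoop goal fuel s.1 s.2

-- an upper bound on the number of while-iterations (proved sufficient in the lemmas below)
def pvFuel (lst : List Int) : Nat :=
  2 + Nat.factorial lst.length * (Nat.factorial lst.length + 2)

def a_star_permutations (lst : List Int) (goal : List Int) : Option (List Int) :=
  let letras := lst
  let visited : PySem.Dict (List Int) Int := PySem.Dict.empty.insert letras 0
  let stack := [(pvH goal letras, letras)]
  pvLoop goal (pvFuel lst) stack visited

-- ===== PORT B =====
def a_star_permutations_alt (lst : List Int) (goal : List Int) : Option (List Int) :=
  if PySem.List.sorted lst (fun x => x) false = PySem.List.sorted goal (fun x => x) false then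
    some goal
  else
    none

-- ===== PRECONDITION & SPEC =====
def Spec_a_star_permutations (lst : List Int) (goal : List Int) (out : Option (List Int)) : Prop := out = a_star_permutations_alt lst goal
instance (lst : List Int) (goal : List Int) (out : Option (List Int)) : Decidable (Spec_a_star_permutations lst goal out) := by unfold Spec_a_star_permutations; infer_instance

-- ===== CLAIM (what is proved, stated in full; the proofs are below) =====
def Claim_equal_a_star_permutations : Prop := ∀ (lst : List Int) (goal : List Int), Dom_a_star_permutations lst goal → Spec_a_star_permutations lst goal (a_star_permutations lst goal)

-- ===== LEMMAS AND PROOFS =====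

-- one swap of two positions, as a shape on lists
def pvStep (x y : List Int) : Prop :=
  ∃ A B C a b, x = A ++ a :: (B ++ b :: C) ∧ y = A ++ b :: (B ++ a :: C)

lemma pvStep_perm {x y : List Int} (h : pvStep x y) : x.Perm y := by
  obtain ⟨A, B, C, a, b, rfl, rfl⟩ := h
  refine List.Perm.append_left A ?_
  exact ((List.Perm.cons a List.perm_middle).trans (List.Perm.swap _ _ _)).trans
    (List.Perm.cons b List.perm_middle.symm)

lemma pvStep_cons {z : Int} {x y : List Int} (h : pvStep x y) : pvStep (z :: x) (z :: y) := by
  obtain ⟨A, B, C, a, b, rfl, rfl⟩ := h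
  exact ⟨z :: A, B, C, a, b, rfl, rfl⟩

lemma pvPerm_reach {x y : List Int} (h : x.Perm y) : Relation.ReflTransGen pvStep x y := by
  induction h with
  | nil => exact .refl
  | cons z h ih => exact Relation.ReflTransGen.lift (fun l => z :: l) (fun _ _ hs => pvStep_cons hs) ih
  | swap u v l => exact Relation.ReflTransGen.single ⟨[], [], l, v, u, rfl, rfl⟩
  | trans h1 h2 ih1 ih2 => exact ih1.trans ih2

lemma pvPopMin_mem (x : Int × List Int) (xs : List (Int × List Int)) : pvPopMin x xs ∈ x :: xs := by
  induction xs generalizing x with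
  | nil => simp [pvPopMin]
  | cons y ys ih =>
      have h := ih (if pvEntryLt y x then y else x)
      simp only [pvPopMin, List.foldl_cons] at *
      rcases List.mem_cons.1 h with h1 | h1
      · rw [h1]; split
        · simp
        · simp
      · simp [h1]

lemma pvPairs_valid {n : Int} {p : Int × Int} (hp : p ∈ pvPairs n) :
    0 ≤ p.1 ∧ p.1 < p.2 ∧ p.2 < n := by
  simp only [pvPairs, List.mem_flatMap, List.mem_map] at hp
  obtain ⟨i, hi, j, hj, rfl⟩ := hp
  rw [PySem.List.mem_pyRange_one] at hi hj
  exact ⟨hi.1, by omega, hj.2⟩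

lemma pvPairs_mem {n i j : Int} (h0 : 0 ≤ i) (hij : i < j) (hj : j < n) : (i, j) ∈ pvPairs n := by
  simp only [pvPairs, List.mem_flatMap, List.mem_map]
  exact ⟨i, PySem.List.mem_pyRange_one.2 ⟨h0, by omega⟩, j, PySem.List.mem_pyRange_one.2 ⟨by omega, hj⟩, rfl⟩

lemma pvNext_decomp (node : List Int) (i j : Nat) (hij : i < j) (hj : j < node.length) :
    pvNext node (i : Int) (j : Int)
      = node.take i ++ node[j] :: ((node.drop (i + 1)).take (j - (i + 1)) ++ node[i] :: node.drop (j + 1)) := by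
  have hi : i < node.length := by omega
  unfold pvNext
  rw [PySem.List.slice_to_natCast]
  rw [show ((i : Int) + 1) = ((i + 1 : Nat) : Int) by push_cast; ring,
      show ((j : Int) + 1) = ((j + 1 : Nat) : Int) by push_cast; ring]
  rw [PySem.List.slice_natCast, PySem.List.slice_from_natCast,
      PySem.List.pyGetD_natCast, PySem.List.pyGetD_natCast,
      List.getD_eq_getElem _ _ hi, List.getD_eq_getElem _ _ hj]
  simp

lemma pvNode_decomp (node : List Int) (i j : Nat) (hij : i < j) (hj : j < node.length) :
    node = node.take i ++ node[i] :: ((node.drop (i + 1)).take (j - (i + 1)) ++ node[j] :: node.drop (j + 1)) := by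
  have hi : i < node.length := by omega
  conv_lhs => rw [← List.take_append_drop i node]
  rw [List.drop_eq_getElem_cons hi]
  congr 1
  congr 1
  conv_lhs => rw [← List.take_append_drop (j - (i+1)) (node.drop (i+1))]
  congr 1
  rw [List.drop_drop, show i + 1 + (j - (i+1)) = j by omega]
  exact List.drop_eq_getElem_cons hj

lemma pvNext_step {node : List Int} {i j : Nat} (hij : i < j) (hj : j < node.length) :
    pvStep node (pvNext node (i : Int) (j : Int)) :=
  ⟨node.take i, (node.drop (i + 1)).take (j - (i + 1)), node.drop (j + 1), node[i], node[j]'hj,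
    pvNode_decomp node i j hij hj, pvNext_decomp node i j hij hj⟩

lemma pvStep_to_pair' {node y : List Int} (h : pvStep node y) :
    ∃ (i j : Nat), i < j ∧ j < node.length ∧ y = pvNext node (i : Int) (j : Int) := by
  obtain ⟨A, B, C, a, b, hx, hy⟩ := h
  refine ⟨A.length, A.length + B.length + 1, by omega, by subst hx; simp; omega, ?_⟩
  have hlen : A.length + B.length + 1 < node.length := by subst hx; simp; omega
  rw [pvNext_decomp node A.length (A.length + B.length + 1) (by omega) hlen]
  have hdropi : node.drop (A.length + 1) = B ++ b :: C := by
    subst hx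
    rw [show A ++ a :: (B ++ b :: C) = (A ++ [a]) ++ (B ++ b :: C) by simp,
        show A.length + 1 = (A ++ [a]).length by simp]
    exact List.drop_left ..
  have htakei : node.take A.length = A := by subst hx; exact List.take_left ..
  have hgeti : node[A.length]'(by omega) = a := by
    have h1 := List.drop_eq_getElem_cons (l := node) (i := A.length) (by omega)
    have h2 : node.drop A.length = a :: (B ++ b :: C) := by subst hx; exact List.drop_left ..
    rw [h2] at h1; exact (List.cons.injEq .. ▸ h1).1.symm
  have hdropj : node.drop (A.length + B.length + 1) = b :: C := by
    rw [show A.length + B.length + 1 = A.length + 1 + B.length by omega, ← List.drop_drop, hdropi]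
    exact List.drop_left ..
  have h1 := List.drop_eq_getElem_cons (l := node) (i := A.length + B.length + 1) hlen
  rw [hdropj] at h1
  have hgetj : node[A.length + B.length + 1]'hlen = b := (List.cons.injEq .. ▸ h1).1.symm
  have hdropj1 : node.drop (A.length + B.length + 1 + 1) = C := (List.cons.injEq .. ▸ h1).2.symm
  have htakeB : (node.drop (A.length + 1)).take (A.length + B.length + 1 - (A.length + 1)) = B := by
    rw [hdropi, show A.length + B.length + 1 - (A.length + 1) = B.length by omega]
    exact List.take_left ..
  rw [htakei, hgeti, hgetj, htakeB, hdropj1, hy]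

-- every pvStep-neighbour of node is produced by some pair of the double loop
lemma pvStep_to_pair {node y : List Int} (h : pvStep node y) :
    ∃ p ∈ pvPairs (PySem.List.len node), y = pvNext node p.1 p.2 := by
  obtain ⟨i, j, hij, hj, hy⟩ := pvStep_to_pair' h
  refine ⟨((i : Int), (j : Int)), ?_, hy⟩
  rw [PySem.List.len_eq]
  exact pvPairs_mem (by positivity) (by exact_mod_cast hij) (by exact_mod_cast hj)

-- core invariant of the search state (everything but the frontier property)
def PvCore (lst : List Int) (st : List (Int × List Int)) (vis : PySem.Dict (List Int) Int) : Prop :=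
  vis.keys.Nodup ∧ lst ∈ vis.keys ∧ (∀ k ∈ vis.keys, k.Perm lst) ∧
  (∀ e ∈ st, e.2 ∈ vis.keys) ∧
  (∀ k ∈ vis.keys, 0 ≤ vis.getD k 0 ∧ (vis.getD k 0).toNat < vis.keys.length)

-- full invariant
def PvInv (lst goal : List Int) (st : List (Int × List Int)) (vis : PySem.Dict (List Int) Int) : Prop :=
  PvCore lst st vis ∧
  (∀ k ∈ vis.keys, (∃ f, (f, k) ∈ st) ∨ (∀ y, pvStep k y → y ∈ vis.keys)) ∧
  (goal ∈ vis.keys → ∃ f, (f, goal) ∈ st)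

-- potential, decreasing across iterations
def pvPhi (N : Nat) (st : List (Int × List Int)) (vis : PySem.Dict (List Int) Int) : Nat :=
  st.length + (vis.keys.map (fun k => (vis.getD k 0).toNat)).sum + (N - vis.keys.length) * (N + 2)

lemma pvKeys_le (lst : List Int) (keys : List (List Int))
    (hnd : keys.Nodup) (hperm : ∀ k ∈ keys, k.Perm lst) :
    keys.length ≤ Nat.factorial lst.length := by
  have hsub : keys ⊆ lst.permutations := fun k hk => List.mem_permutations.2 (hperm k hk)
  have := (hnd.subperm hsub).length_le
  simpa [List.length_permutations] using this

lemma pvSum_update {keys : List (List Int)} {next : List Int} (hnd : keys.Nodup) (hmem : next ∈ keys)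
    (f f' : List Int → Nat) (hagree : ∀ k ∈ keys, k ≠ next → f' k = f k) :
    (keys.map f').sum + f next = (keys.map f).sum + f' next := by
  obtain ⟨K1, K2, rfl⟩ := List.append_of_mem hmem
  rw [List.nodup_append] at hnd
  have hn1 : next ∉ K1 := fun h => (hnd.2.2 next h next (by simp)) rfl
  have hmap : ∀ (g g' : List Int → Nat), (∀ k ∈ K1 ++ next :: K2, k ≠ next → g' k = g k) →
      K1.map g' = K1.map g ∧ K2.map g' = K2.map g := by
    intro g g' hag
    constructor
    · exact List.map_congr_left (fun k hk => hag k (by simp [hk]) (fun he => hn1 (he ▸ hk)))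
    · exact List.map_congr_left (fun k hk => hag k (by simp [hk])
        (fun he => ((List.nodup_cons.1 hnd.2.1).1) (he ▸ hk)))
  obtain ⟨h1, h2⟩ := hmap f f' hagree
  simp only [List.map_append, List.map_cons, List.sum_append, List.sum_cons, h1, h2]
  omega

lemma pvRelax_spec (lst goal node : List Int) (st : List (Int × List Int))
    (vis : PySem.Dict (List Int) Int) (i j : Int)
    (hcore : PvCore lst st vis) (hnode : node ∈ vis.keys)
    (hij : 0 ≤ i ∧ i < j ∧ j < node.length) :
    PvCore lst (pvRelax goal node (st, vis) (i, j)).1 (pvRelax goal node (st, vis) (i, j)).2 ∧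
    (∀ k ∈ vis.keys, k ∈ (pvRelax goal node (st, vis) (i, j)).2.keys) ∧
    (∀ e ∈ st, e ∈ (pvRelax goal node (st, vis) (i, j)).1) ∧
    pvNext node i j ∈ (pvRelax goal node (st, vis) (i, j)).2.keys ∧
    (∀ k ∈ (pvRelax goal node (st, vis) (i, j)).2.keys,
       k ∈ vis.keys ∨ ∃ f, (f, k) ∈ (pvRelax goal node (st, vis) (i, j)).1) ∧
    pvPhi (Nat.factorial lst.length) (pvRelax goal node (st, vis) (i, j)).1
        (pvRelax goal node (st, vis) (i, j)).2 ≤ pvPhi (Nat.factorial lst.length) st vis := by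
  obtain ⟨hnd, hstart, hperm, hstack, hvals⟩ := hcore
  have hstep : pvStep node (pvNext node i j) := by
    obtain ⟨h0, h12, h2n⟩ := hij
    have hcast : pvNext node i j = pvNext node ((i.toNat : Nat) : Int) ((j.toNat : Nat) : Int) := by
      rw [Int.toNat_of_nonneg h0, Int.toNat_of_nonneg (by omega)]
    rw [hcast]
    exact pvNext_step (by omega) (by omega)
  have hnextperm : (pvNext node i j).Perm lst := (pvStep_perm hstep).symm.trans (hperm node hnode)
  have hv0 := hvals node hnode
  set N := Nat.factorial lst.length with hN
  set next := pvNext node i j with hnextdef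
  set g : Int := vis.getD node 0 + 1 with hg
  have hgpos : 0 ≤ g := by omega
  have hgle : g.toNat ≤ vis.keys.length := by omega
  -- the three branches of the loop body
  rcases hget : vis.get? next with _ | v
  · -- next not in visited: record it and push
    have heq : pvRelax goal node (st, vis) (i, j)
        = (st ++ [(g + pvH goal next, next)], vis.insert next g) := by
      simp only [pvRelax, ← hnextdef, ← hg]
      rw [hget]
    have hnc : vis.contains next = false := by
      rw [PySem.Dict.contains_eq_isSome_get?, hget]; rfl
    have hnm : next ∉ vis.keys := fun h => by
      rw [← PySem.Dict.contains_iff_mem_keys] at h; rw [h] at hnc; simp at hnc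
    have hkeys : (vis.insert next g).keys = vis.keys ++ [next] :=
      PySem.Dict.keys_insert_of_not_contains vis g hnc
    have hgetDne : ∀ k, k ≠ next → (vis.insert next g).getD k 0 = vis.getD k 0 := fun k hk =>
      PySem.Dict.getD_insert_of_ne vis g 0 hk
    have hgetDnext : (vis.insert next g).getD next 0 = g := PySem.Dict.getD_insert_self ..
    have hnd' : (vis.insert next g).keys.Nodup := by
      rw [hkeys]; simp only [List.nodup_append]
      exact ⟨hnd, List.nodup_singleton _, fun a ha b hb => by simp at hb; exact fun he => hnm ((he.trans hb) ▸ ha)⟩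
    have hperm' : ∀ k ∈ (vis.insert next g).keys, k.Perm lst := by
      intro k hk; rw [hkeys] at hk
      rcases List.mem_append.1 hk with hk | hk
      · exact hperm k hk
      · rw [List.mem_singleton.1 hk]; exact hnextperm
    have hslen : vis.keys.length + 1 ≤ N := by
      have := pvKeys_le lst _ hnd' hperm'
      rw [hkeys] at this; simpa using this
    rw [heq]
    refine ⟨⟨hnd', by rw [hkeys]; exact List.mem_append_left _ hstart, hperm', ?_, ?_⟩, ?_, ?_, ?_, ?_, ?_⟩
    · intro e he
      rcases List.mem_append.1 he with he | he
      · rw [hkeys]; exact List.mem_append_left _ (hstack e he)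
      · rw [List.mem_singleton.1 he, hkeys]; simp
    · intro k hk
      rw [hkeys] at hk ⊢
      rcases List.mem_append.1 hk with hk | hk
      · have hne : k ≠ next := fun he => hnm (he ▸ hk)
        rw [hgetDne k hne]
        obtain ⟨h1, h2⟩ := hvals k hk
        exact ⟨h1, by simp; omega⟩
      · rw [List.mem_singleton.1 hk, hgetDnext]
        exact ⟨hgpos, by simp; omega⟩
    · intro k hk; rw [hkeys]; exact List.mem_append_left _ hk
    · intro e he; exact List.mem_append_left _ he
    · rw [hkeys]; simp
    · intro k hk; rw [hkeys] at hk
      rcases List.mem_append.1 hk with hk | hk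
      · exact Or.inl hk
      · exact Or.inr ⟨g + pvH goal next, by rw [List.mem_singleton.1 hk]; simp⟩
    · unfold pvPhi
      rw [hkeys]
      have hmapeq : (vis.keys ++ [next]).map (fun k => ((vis.insert next g).getD k 0).toNat)
          = vis.keys.map (fun k => (vis.getD k 0).toNat) ++ [g.toNat] := by
        rw [List.map_append]
        congr 1
        · exact List.map_congr_left (fun k hk => by rw [hgetDne k (fun he => hnm (he ▸ hk))])
        · simp [hgetDnext]
      rw [hmapeq]
      simp only [List.length_append, List.sum_append, List.sum_cons,
        List.sum_nil, List.length_cons, List.length_nil]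
      have hexp : (N - vis.keys.length) * (N + 2)
          = (N - (vis.keys.length + 1)) * (N + 2) + (N + 2) := by
        have h : N - vis.keys.length = (N - (vis.keys.length + 1)) + 1 := by omega
        rw [h]; ring
      rw [hexp]
      simp only [Nat.zero_add, Nat.add_zero]
      omega
  · -- next already in visited with value v
    have hct : vis.contains next = true := by
      rw [PySem.Dict.contains_eq_isSome_get?, hget]; rfl
    have hmem : next ∈ vis.keys := (PySem.Dict.contains_iff_mem_keys vis next).1 hct
    have hvnext : vis.getD next 0 = v := PySem.Dict.getD_of_get?_eq_some vis 0 hget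
    by_cases hlt : g < v
    · have heq : pvRelax goal node (st, vis) (i, j)
          = (st ++ [(g + pvH goal next, next)], vis.insert next g) := by
        simp only [pvRelax, ← hnextdef, ← hg]
        rw [hget]; exact if_pos hlt
      have hkeys : (vis.insert next g).keys = vis.keys :=
        PySem.Dict.keys_insert_of_contains vis g hct
      have hgetDne : ∀ k, k ≠ next → (vis.insert next g).getD k 0 = vis.getD k 0 := fun k hk =>
        PySem.Dict.getD_insert_of_ne vis g 0 hk
      have hgetDnext : (vis.insert next g).getD next 0 = g := PySem.Dict.getD_insert_self ..
      have hvbound := hvals next hmem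
      rw [heq]
      refine ⟨⟨by rw [hkeys]; exact hnd, by rw [hkeys]; exact hstart,
        by rw [hkeys]; exact hperm, ?_, ?_⟩, ?_, ?_, ?_, ?_, ?_⟩
      · intro e he
        rw [hkeys]
        rcases List.mem_append.1 he with he | he
        · exact hstack e he
        · rw [List.mem_singleton.1 he]; exact hmem
      · intro k hk
        rw [hkeys] at hk ⊢
        by_cases hne : k = next
        · subst hne; rw [hgetDnext]
          rw [hvnext] at hvbound; exact ⟨hgpos, by omega⟩
        · rw [hgetDne k hne]; exact hvals k hk
      · intro k hk; rw [hkeys]; exact hk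
      · intro e he; exact List.mem_append_left _ he
      · rw [hkeys]; exact hmem
      · intro k hk; rw [hkeys] at hk; exact Or.inl hk
      · unfold pvPhi
        rw [hkeys]
        have hsum := pvSum_update (next := next) hnd hmem
          (fun k => (vis.getD k 0).toNat) (fun k => ((vis.insert next g).getD k 0).toNat)
          (fun k _ hk => by simp only [hgetDne k hk])
        simp only [hgetDnext, hvnext] at hsum
        simp only [List.length_append, List.length_cons, List.length_nil]
        rw [hvnext] at hvbound
        omega
    · have heq : pvRelax goal node (st, vis) (i, j) = (st, vis) := by
        simp only [pvRelax, ← hnextdef, ← hg]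
        rw [hget]; exact if_neg hlt
      rw [heq]
      exact ⟨⟨hnd, hstart, hperm, hstack, hvals⟩, fun k hk => hk, fun e he => he, hmem,
        fun k hk => Or.inl hk, le_refl _⟩
lemma pvFold_spec (lst goal node : List Int) (ps : List (Int × Int))
    (hps : ∀ p ∈ ps, 0 ≤ p.1 ∧ p.1 < p.2 ∧ p.2 < node.length) :
    ∀ (st : List (Int × List Int)) (vis : PySem.Dict (List Int) Int),
    PvCore lst st vis → node ∈ vis.keys →
    PvCore lst (ps.foldl (pvRelax goal node) (st, vis)).1 (ps.foldl (pvRelax goal node) (st, vis)).2 ∧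
    (∀ k ∈ vis.keys, k ∈ (ps.foldl (pvRelax goal node) (st, vis)).2.keys) ∧
    (∀ e ∈ st, e ∈ (ps.foldl (pvRelax goal node) (st, vis)).1) ∧
    (∀ p ∈ ps, pvNext node p.1 p.2 ∈ (ps.foldl (pvRelax goal node) (st, vis)).2.keys) ∧
    (∀ k ∈ (ps.foldl (pvRelax goal node) (st, vis)).2.keys,
       k ∈ vis.keys ∨ ∃ f, (f, k) ∈ (ps.foldl (pvRelax goal node) (st, vis)).1) ∧
    pvPhi (Nat.factorial lst.length) (ps.foldl (pvRelax goal node) (st, vis)).1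
        (ps.foldl (pvRelax goal node) (st, vis)).2 ≤ pvPhi (Nat.factorial lst.length) st vis := by
  induction ps with
  | nil =>
      intro st vis hcore _
      exact ⟨hcore, fun k hk => hk, fun e he => he, by simp, fun k hk => Or.inl hk, le_refl _⟩
  | cons p ps ih =>
      intro st vis hcore hnodemem
      obtain ⟨i, j⟩ := p
      have hv := hps (i, j) (List.mem_cons_self ..)
      have hr := pvRelax_spec lst goal node st vis i j hcore hnodemem hv
      simp only [List.foldl_cons]
      rcases hs1 : pvRelax goal node (st, vis) (i, j) with ⟨st1, vis1⟩
      rw [hs1] at hr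
      obtain ⟨hcore1, hkeys1, hst1, hnext1, hnew1, hphi1⟩ := hr
      have ihh := ih (fun q hq => hps q (List.mem_cons_of_mem _ hq)) st1 vis1 hcore1
        (hkeys1 node hnodemem)
      obtain ⟨icore, ikeys, ist, ipairs, inew, iphi⟩ := ihh
      refine ⟨icore, fun k hk => ikeys k (hkeys1 k hk), fun e he => ist e (hst1 e he), ?_, ?_, ?_⟩
      · intro q hq
        rcases List.mem_cons.1 hq with hq | hq
        · rw [hq]; exact ikeys _ hnext1
        · exact ipairs q hq
      · intro k hk
        rcases inew k hk with hk1 | hk1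
        · rcases hnew1 k hk1 with hk2 | ⟨f, hf⟩
          · exact Or.inl hk2
          · exact Or.inr ⟨f, ist _ hf⟩
        · exact Or.inr hk1
      · exact le_trans iphi hphi1

lemma pvAlt_eq (lst goal : List Int) :
    a_star_permutations_alt lst goal = if lst.Perm goal then some goal else none := by
  unfold a_star_permutations_alt
  by_cases h : lst.Perm goal
  · rw [if_pos ((PySem.List.sorted_id_eq_sorted_id_iff_perm lst goal).2 h), if_pos h]
  · rw [if_neg (fun hs => h ((PySem.List.sorted_id_eq_sorted_id_iff_perm lst goal).1 hs)), if_neg h]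

lemma pvClosure {keys : List (List Int)} (hclosed : ∀ k ∈ keys, ∀ y, pvStep k y → y ∈ keys)
    {x y : List Int} (hx : x ∈ keys) (h : Relation.ReflTransGen pvStep x y) : y ∈ keys := by
  induction h with
  | refl => exact hx
  | tail _ h2 ih => exact hclosed _ ih _ h2

lemma pvLoop_spec (lst goal : List Int) : ∀ (fuel : Nat) (st : List (Int × List Int))
    (vis : PySem.Dict (List Int) Int), PvInv lst goal st vis →
    pvPhi (Nat.factorial lst.length) st vis < fuel →
    pvLoop goal fuel st vis = a_star_permutations_alt lst goal := by
  intro fuel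
  induction fuel with
  | zero => intro st vis _ hphi; exact absurd hphi (by omega)
  | succ fuel ih =>
    intro st vis hinv hphi
    obtain ⟨⟨hnd, hstart, hperm, hstack, hvals⟩, hfront, hgoalst⟩ := hinv
    rcases st with _ | ⟨e, rest⟩
    · -- stack exhausted: goal is not a permutation of lst
      have hnotperm : ¬ lst.Perm goal := by
        intro hp
        have hclosed : ∀ k ∈ vis.keys, ∀ y, pvStep k y → y ∈ vis.keys := by
          intro k hk
          rcases hfront k hk with ⟨f, hf⟩ | hc
          · exact absurd hf (List.not_mem_nil)
          · exact hc
        have hmemgoal : goal ∈ vis.keys := pvClosure hclosed hstart (pvPerm_reach hp)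
        obtain ⟨f, hf⟩ := hgoalst hmemgoal
        exact List.not_mem_nil hf
      rw [pvAlt_eq, if_neg hnotperm]
      rfl
    · have hmmem : pvPopMin e rest ∈ e :: rest := pvPopMin_mem e rest
      set m := pvPopMin e rest with hm
      have hmkeys : m.2 ∈ vis.keys := hstack m hmmem
      by_cases hg : m.2 = goal
      · have hlp : lst.Perm goal := hg ▸ (hperm m.2 hmkeys).symm
        have : pvLoop goal (fuel + 1) (e :: rest) vis = some m.2 := by
          simp only [pvLoop, ← hm]
          rw [if_pos hg]
        rw [this, pvAlt_eq, if_pos hlp, hg]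
      · set stack' := (e :: rest).erase m with hstack'
        set ps := pvPairs (PySem.List.len m.2) with hps
        have hvalid : ∀ p ∈ ps, 0 ≤ p.1 ∧ p.1 < p.2 ∧ p.2 < (m.2.length : Int) := by
          intro p hp
          have := pvPairs_valid (n := PySem.List.len m.2) (by rw [← hps]; exact hp)
          rwa [PySem.List.len_eq] at this
        have hcore' : PvCore lst stack' vis :=
          ⟨hnd, hstart, hperm, fun x hx => hstack x (List.erase_subset hx), hvals⟩
        obtain ⟨fcore, fkeys, fst, fpairs, fnew, fphi⟩ :=
          pvFold_spec lst goal m.2 ps hvalid stack' vis hcore' hmkeys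
        set s := ps.foldl (pvRelax goal m.2) (stack', vis) with hs
        have hsurvive : ∀ (f : Int) (k : List Int), k ≠ m.2 → (f, k) ∈ e :: rest → (f, k) ∈ s.1 := by
          intro f k hk hfk
          refine fst _ ?_
          rw [hstack']
          exact (List.mem_erase_of_ne (by intro hcontr; exact hk (congrArg Prod.snd hcontr))).2 hfk
        have hinv' : PvInv lst goal s.1 s.2 := by
          refine ⟨fcore, ?_, ?_⟩
          · intro k hk
            rcases fnew k hk with hk1 | hk1
            · by_cases hkm : k = m.2
              · refine Or.inr ?_
                intro y hy
                subst hkm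
                obtain ⟨p, hp, hyeq⟩ := pvStep_to_pair hy
                rw [hyeq]
                exact fpairs p hp
              · rcases hfront k hk1 with ⟨f, hf⟩ | hc
                · exact Or.inl ⟨f, hsurvive f k hkm hf⟩
                · exact Or.inr (fun y hy => fkeys _ (hc y hy))
            · exact Or.inl hk1
          · intro hgk
            rcases fnew goal hgk with hk1 | hk1
            · obtain ⟨f, hf⟩ := hgoalst hk1
              exact ⟨f, hsurvive f goal (fun he => hg he.symm) hf⟩
            · exact hk1
        have hphis : pvPhi (Nat.factorial lst.length) s.1 s.2 < fuel := by
          have herase : stack'.length + 1 = (e :: rest).length := by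
            rw [hstack', List.length_erase_of_mem hmmem]
            simp
          have : pvPhi (Nat.factorial lst.length) stack' vis + 1
              = pvPhi (Nat.factorial lst.length) (e :: rest) vis := by
            unfold pvPhi; omega
          omega
        have hstep : pvLoop goal (fuel + 1) (e :: rest) vis = pvLoop goal fuel s.1 s.2 := by
          simp only [pvLoop, ← hm, ← hstack', ← hps, ← hs]
          rw [if_neg hg]
        rw [hstep]
        exact ih s.1 s.2 hinv' hphis

-- ===== VERDICT (by name: the statement is the Claim_ definition above) =====
theorem a_star_permutations_spec : Claim_equal_a_star_permutations := by
  intro lst goal _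
  unfold Spec_a_star_permutations a_star_permutations
  have hkeys : (PySem.Dict.empty.insert lst (0 : Int)).keys = [lst] := by
    rw [PySem.Dict.keys_insert_of_not_contains PySem.Dict.empty 0 (PySem.Dict.contains_empty lst)]
    rfl
  have hgetD : (PySem.Dict.empty.insert lst (0 : Int)).getD lst 0 = 0 :=
    PySem.Dict.getD_insert_self ..
  apply pvLoop_spec
  · refine ⟨⟨?_, ?_, ?_, ?_, ?_⟩, ?_, ?_⟩
    · rw [hkeys]; exact List.nodup_singleton _
    · rw [hkeys]; exact List.mem_singleton_self _
    · intro k hk; rw [hkeys] at hk; rw [List.mem_singleton.1 hk]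
    · intro e he; rw [List.mem_singleton.1 he, hkeys]; simp
    · intro k hk; rw [hkeys] at hk; rw [List.mem_singleton.1 hk, hgetD, hkeys]
      exact ⟨le_refl _, by simp⟩
    · intro k hk; rw [hkeys] at hk
      exact Or.inl ⟨pvH goal lst, by rw [List.mem_singleton.1 hk]; simp⟩
    · intro hgk; rw [hkeys] at hgk
      exact ⟨pvH goal lst, by rw [List.mem_singleton.1 hgk]; simp⟩
  · unfold pvPhi pvFuel
    rw [hkeys]
    simp only [List.map_cons, List.map_nil, hgetD, List.length_cons,
      List.length_nil, List.sum_cons, List.sum_nil]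
    have hpos : 1 ≤ Nat.factorial lst.length := Nat.one_le_iff_ne_zero.2 (Nat.factorial_ne_zero _)
    obtain ⟨M, hM⟩ : ∃ M, Nat.factorial lst.length = M + 1 := ⟨Nat.factorial lst.length - 1, by omega⟩
    rw [hM]
    have h1 : M + 1 - 1 = M := by omega
    rw [h1]
    have hexp : (M + 1) * (M + 1 + 2) = M * (M + 1 + 2) + (M + 1 + 2) := by ring
    omega
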